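-- pv_equiv track=rewrite | github.com/Catsvilles/Robatim | generate/idioms/score.py | allows_truncation
-- ===== SOURCE A (Python) =====
-- def allows_truncation(sequence, divisor, repeat_value):
-- 	"""Check last item equality of list dividends"""
-- 	if divisor < 2:
-- 		return False
-- 	if len(sequence) < divisor:
-- 		return False
--
-- 	for index, current_item in enumerate(sequence):
-- 		item_num = index + 1
-- 		if item_num % divisor == 0 and current_item != repeat_value:
-- 			return False
-- 	return True
-- ===== SOURCE B (Python) =====
-- def allows_truncation(sequence, divisor, repeat_value):
--     """Check last item equality of list dividends"""
--     if divisor < 2: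
--         return False
--     if len(sequence) < divisor:
--         return False
--     return all(sequence[i] == repeat_value
--                for i in range(divisor - 1, len(sequence), divisor))
-- ===== Notes on version B (the rewrite author's own statement) =====
-- stated objective: idiomatic
-- what changed: Instead of enumerating every element and filtering by (index+1) % divisor == 0, B iterates only the strided positions range(divisor-1, len(sequence), divisor) and checks all of them equal repeat_value with all().
import Mathlib
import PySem

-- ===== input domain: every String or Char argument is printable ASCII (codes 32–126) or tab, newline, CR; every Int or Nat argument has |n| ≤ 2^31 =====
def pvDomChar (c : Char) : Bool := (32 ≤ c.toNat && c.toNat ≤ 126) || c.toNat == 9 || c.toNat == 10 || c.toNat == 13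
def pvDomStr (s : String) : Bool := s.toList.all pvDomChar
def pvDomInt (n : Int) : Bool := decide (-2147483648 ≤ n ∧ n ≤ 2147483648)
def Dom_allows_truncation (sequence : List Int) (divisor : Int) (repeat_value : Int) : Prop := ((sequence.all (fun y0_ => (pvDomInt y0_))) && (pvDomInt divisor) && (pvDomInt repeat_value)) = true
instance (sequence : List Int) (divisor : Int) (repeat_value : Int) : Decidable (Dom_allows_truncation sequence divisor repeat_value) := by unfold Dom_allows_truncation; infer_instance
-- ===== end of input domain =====

-- B iterates only the strided positions range(divisor-1, len, divisor) instead of scanning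
-- every element and filtering by (index+1) % divisor == 0 (objective: idiomatic).


-- ===== PORT A =====
-- the for-loop with early return: scans every (index, item) pair
def pvLoopA (divisor repeat_value : Int) : List (Int × Int) → Bool
  | [] => true
  | (index, item) :: rest =>
      if PySem.Int.mod (index + 1) divisor == 0 && item != repeat_value then false
      else pvLoopA divisor repeat_value rest

def allows_truncation (sequence : List Int) (divisor : Int) (repeat_value : Int) : Bool :=
  if divisor < 2 then false
  else if (sequence.length : Int) < divisor then false
  else pvLoopA divisor repeat_value (PySem.List.enumerate sequence)

-- ===== PORT B =====
-- sequence[i]: every i drawn from range(divisor-1, len, divisor) is in range, so the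
-- default of pyGetD is never used and it is exact here.
def allows_truncation_alt (sequence : List Int) (divisor : Int) (repeat_value : Int) : Bool :=
  if divisor < 2 then false
  else if (sequence.length : Int) < divisor then false
  else (PySem.List.pyRange (divisor - 1) (sequence.length) divisor).all
        (fun i => PySem.List.pyGetD sequence i 0 == repeat_value)

-- ===== PRECONDITION & SPEC =====
def Spec_allows_truncation (sequence : List Int) (divisor : Int) (repeat_value : Int) (out : Bool) : Prop := out = allows_truncation_alt sequence divisor repeat_value
instance (sequence : List Int) (divisor : Int) (repeat_value : Int) (out : Bool) : Decidable (Spec_allows_truncation sequence divisor repeat_value out) := by unfold Spec_allows_truncation; infer_instance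

-- ===== CLAIM (what is proved, stated in full; the proofs are below) =====
def Claim_equal_allows_truncation : Prop := ∀ (sequence : List Int) (divisor : Int) (repeat_value : Int), Dom_allows_truncation sequence divisor repeat_value → Spec_allows_truncation sequence divisor repeat_value (allows_truncation sequence divisor repeat_value)

-- ===== LEMMAS AND PROOFS =====

theorem pvLoopA_eq_true_iff (divisor repeat_value : Int) (l : List (Int × Int)) :
    pvLoopA divisor repeat_value l = true ↔
      ∀ p ∈ l, PySem.Int.mod (p.1 + 1) divisor = 0 → p.2 = repeat_value := by
  induction l with
  | nil => simp [pvLoopA]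
  | cons p rest ih =>
      obtain ⟨index, item⟩ := p
      simp only [pvLoopA]
      split_ifs with h
      · simp only [Bool.and_eq_true, beq_iff_eq, bne_iff_ne] at h
        constructor
        · intro hfalse; exact absurd hfalse (by simp)
        · intro hall
          exact absurd (hall (index, item) (List.mem_cons_self) h.1) h.2
      · simp only [Bool.and_eq_true, beq_iff_eq, bne_iff_ne, not_and, not_not] at h
        rw [ih, List.forall_mem_cons]
        constructor
        · intro hall; exact ⟨h, hall⟩
        · intro hall; exact hall.2

theorem allows_truncation_main (sequence : List Int) (divisor repeat_value : Int)
    (hd : ¬ divisor < 2) (_hn : ¬ (sequence.length : Int) < divisor) :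
    pvLoopA divisor repeat_value (PySem.List.enumerate sequence) =
      (PySem.List.pyRange (divisor - 1) (sequence.length) divisor).all
        (fun i => PySem.List.pyGetD sequence i 0 == repeat_value) := by
  have hdpos : (0 : Int) < divisor := by omega
  rw [Bool.eq_iff_iff, pvLoopA_eq_true_iff, List.all_eq_true]
  constructor
  · -- A's loop condition implies B's strided check
    intro hall i hi
    rw [PySem.List.mem_pyRange_iff_of_pos hdpos] at hi
    obtain ⟨h1, h2, c, hc⟩ := hi
    have hi0 : (0 : Int) ≤ i := by omega
    have hk : i.toNat < sequence.length := by omega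
    have hp : ((0 : Int) + (i.toNat : Int), sequence[i.toNat]) ∈ PySem.List.enumerate sequence := by
      rw [PySem.List.mem_enumerate_iff]
      exact ⟨i.toNat, hk, rfl⟩
    have hmod : PySem.Int.mod (0 + (i.toNat : Int) + 1) divisor = 0 := by
      rw [PySem.Int.mod_eq_zero_iff_dvd]
      refine ⟨c + 1, ?_⟩
      rw [Int.toNat_of_nonneg hi0, zero_add, mul_add, mul_one]
      linarith
    have := hall _ hp hmod
    simp only at this
    rw [PySem.List.pyGetD_eq_getElem sequence 0 hi0 h2]
    simp [this]
  · -- B's strided check implies A's loop condition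
    intro hall p hp hmod
    rw [PySem.List.mem_enumerate_iff] at hp
    obtain ⟨k, hk, rfl⟩ := hp
    simp only [zero_add] at hmod ⊢
    rw [PySem.Int.mod_eq_zero_iff_dvd] at hmod
    obtain ⟨c, hc⟩ := hmod
    have hc1 : 1 ≤ c := by nlinarith [Int.natCast_nonneg k]
    have hmem : ((k : Int)) ∈ PySem.List.pyRange (divisor - 1) (sequence.length) divisor := by
      rw [PySem.List.mem_pyRange_iff_of_pos hdpos]
      refine ⟨by nlinarith, by exact_mod_cast hk, c - 1, ?_⟩
      rw [mul_sub, mul_one]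
      linarith
    have := hall _ hmem
    rw [PySem.List.pyGetD_eq_getElem sequence 0 (Int.natCast_nonneg k)
        (by exact_mod_cast hk)] at this
    simpa using this

-- ===== VERDICT (by name: the statement is the Claim_ definition above) =====
theorem allows_truncation_spec : Claim_equal_allows_truncation := by
  intro sequence divisor repeat_value _
  unfold Spec_allows_truncation allows_truncation allows_truncation_alt
  by_cases hd : divisor < 2
  · simp [hd]
  · by_cases hn : (sequence.length : Int) < divisor
    · simp [hd, hn]
    · simp only [hd, hn, if_false]
      exact allows_truncation_main sequence divisor repeat_value hd hn
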